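-- pv_equiv track=rewrite | github.com/rubelw/OSSS | src/OSSS/ai/agents/query_data/handlers/scorecards_handler.py | _order_scorecard_fields
-- ===== SOURCE A (Python) =====
-- from typing import Any, Dict, List
--
-- def _order_scorecard_fields(fieldnames: List[str]) -> List[str]:
--     """
--     Put the most useful scorecard fields first, and move 'id' to the end
--     if present, while preserving any other fields.
--     """
--     if not fieldnames:
--         return fieldnames
--
--     preferred_first = [
--         "name",
--         "plan_id",
--         "created_at",
--         "updated_at",
--     ]
--
--     ordered: List[str] = []
--     for f in preferred_first:
--         if f in fieldnames:
--             ordered.append(f)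
--
--     for f in fieldnames:
--         if f not in ordered and f != "id":
--             ordered.append(f)
--
--     if "id" in fieldnames:
--         ordered.append("id")
--
--     return ordered
-- ===== SOURCE B (Python) =====
-- from typing import List
--
-- def _order_scorecard_fields(fieldnames: List[str]) -> List[str]:
--     """
--     Put the most useful scorecard fields first, and move 'id' to the end
--     if present, while preserving any other fields.
--     """
--     if not fieldnames:
--         return fieldnames
--
--     preferred_first = [
--         "name",
--         "plan_id",
--         "created_at",
--         "updated_at",
--     ]
--
--     def rank(f: str) -> int:
--         if f in preferred_first:
--             return preferred_first.index(f)
--         return len(preferred_first) + 1 if f == "id" else len(preferred_first)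
--
--     deduped = list(dict.fromkeys(fieldnames))
--     n = len(fieldnames)
--     return sorted(deduped, key=lambda f: rank(f) * n + fieldnames.index(f))
-- ===== Notes on version B (the rewrite author's own statement) =====
-- stated objective: alternative
-- what changed: A builds the result with three accumulator loops, rescanning the partially built output to deduplicate; B de-duplicates once with dict.fromkeys and obtains the whole order from a single stable sort under an integer priority key (preferred rank, then first-occurrence index, id last).
import Mathlib
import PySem

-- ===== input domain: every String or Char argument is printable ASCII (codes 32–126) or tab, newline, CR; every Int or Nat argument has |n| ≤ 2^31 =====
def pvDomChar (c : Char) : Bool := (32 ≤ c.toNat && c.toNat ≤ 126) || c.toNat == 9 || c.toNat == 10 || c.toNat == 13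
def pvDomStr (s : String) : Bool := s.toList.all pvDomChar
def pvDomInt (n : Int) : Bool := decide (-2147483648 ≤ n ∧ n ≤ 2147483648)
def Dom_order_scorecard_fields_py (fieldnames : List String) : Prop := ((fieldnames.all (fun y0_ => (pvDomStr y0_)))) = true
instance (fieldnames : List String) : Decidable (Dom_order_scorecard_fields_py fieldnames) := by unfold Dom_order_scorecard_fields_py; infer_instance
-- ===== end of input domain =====

-- B replaces A's three accumulator loops (one of which rescans the partially built
-- output on every element) by a single stable sort of the deduplicated fieldnames
-- under an integer priority key; same return value, alternative algorithm.

-- ===== PORT A =====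
-- the literal preferred_first list from the Python source (shared by both ports)
def preferredFirst : List String := ["name", "plan_id", "created_at", "updated_at"]

def order_scorecard_fields_py (fieldnames : List String) : List String :=
  if fieldnames = [] then fieldnames
  else
    let ordered : List String :=
      preferredFirst.foldl (fun acc f => if f ∈ fieldnames then acc ++ [f] else acc) []
    let ordered2 :=
      fieldnames.foldl (fun acc f => if f ∉ acc ∧ f ≠ "id" then acc ++ [f] else acc) ordered
    if "id" ∈ fieldnames then ordered2 ++ ["id"] else ordered2

-- ===== PORT B =====
-- rank(f) = preferred_first.index(f) if present, len(preferred_first)+1 for "id", else len(preferred_first)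
def rankB (f : String) : Nat :=
  match PySem.List.index? preferredFirst f with
  | some i => i
  | none => if f = "id" then preferredFirst.length + 1 else preferredFirst.length

-- key = rank(f) * len(fieldnames) + fieldnames.index(f); the key is only applied to
-- members of fieldnames, where Python's fieldnames.index(f) is exactly this value
-- (the getD fallback is unreachable there)
def keyB (fieldnames : List String) (f : String) : Nat :=
  rankB f * fieldnames.length + (PySem.List.index? fieldnames f).getD 0

def order_scorecard_fields_py_alt (fieldnames : List String) : List String :=
  if fieldnames = [] then fieldnames
  else
    let deduped := PySem.List.dedup fieldnames
    PySem.List.sorted deduped (keyB fieldnames) false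

-- ===== PRECONDITION & SPEC =====
def Spec_order_scorecard_fields_py (fieldnames : List String) (out : List String) : Prop := out = order_scorecard_fields_py_alt fieldnames
instance (fieldnames : List String) (out : List String) : Decidable (Spec_order_scorecard_fields_py fieldnames out) := by unfold Spec_order_scorecard_fields_py; infer_instance

-- ===== CLAIM (what is proved, stated in full; the proofs are below) =====
def Claim_equal_order_scorecard_fields_py : Prop := ∀ (fieldnames : List String), Dom_order_scorecard_fields_py fieldnames → Spec_order_scorecard_fields_py fieldnames (order_scorecard_fields_py fieldnames)

-- ===== LEMMAS AND PROOFS =====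

def headD (fieldnames : List String) : List String :=
  preferredFirst.filter (fun f => decide (f ∈ fieldnames))

def myDedup (seen l : List String) : List String :=
  match l with
  | [] => []
  | f :: l' => if f ∈ seen ∨ f = "id" then myDedup seen l'
               else f :: myDedup (f :: seen) l'

def targetT (fieldnames : List String) : List String :=
  headD fieldnames ++ (myDedup (headD fieldnames) fieldnames ++
    (if "id" ∈ fieldnames then ["id"] else []))

theorem mem_myDedup (x : String) : ∀ (l seen : List String),
    x ∈ myDedup seen l ↔ x ∈ l ∧ x ∉ seen ∧ x ≠ "id" := by
  intro l
  induction l with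
  | nil => intro seen; simp [myDedup]
  | cons f l' ih =>
    intro seen
    by_cases h : f ∈ seen ∨ f = "id"
    · rw [myDedup, if_pos h]
      rw [ih]
      constructor
      · rintro ⟨hl, hs, hid⟩
        exact ⟨List.mem_cons_of_mem _ hl, hs, hid⟩
      · rintro ⟨hl, hs, hid⟩
        rcases List.mem_cons.mp hl with rfl | hl
        · rcases h with h | h
          · exact absurd h hs
          · exact absurd h hid
        · exact ⟨hl, hs, hid⟩
    · rw [myDedup, if_neg h]
      push_neg at h
      simp only [List.mem_cons, ih]
      by_cases hxf : x = f
      · subst hxf; simp [h.1, h.2]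
      · simp [hxf]

theorem nodup_myDedup : ∀ (l seen : List String), (myDedup seen l).Nodup := by
  intro l
  induction l with
  | nil => intro seen; simp [myDedup]
  | cons f l' ih =>
    intro seen
    by_cases h : f ∈ seen ∨ f = "id"
    · rw [myDedup, if_pos h]; exact ih seen
    · rw [myDedup, if_neg h]
      refine List.nodup_cons.mpr ⟨fun hf => ?_, ih _⟩
      exact ((mem_myDedup f l' (f :: seen)).mp hf).2.1 (List.mem_cons_self ..)

theorem myDedup_congr : ∀ (l s₁ s₂ : List String), (∀ x, x ∈ s₁ ↔ x ∈ s₂) →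
    myDedup s₁ l = myDedup s₂ l := by
  intro l
  induction l with
  | nil => intro s₁ s₂ _; rfl
  | cons f l' ih =>
    intro s₁ s₂ h
    by_cases hf : f ∈ s₁ ∨ f = "id"
    · rw [myDedup, if_pos hf, myDedup,
        if_pos (by rcases hf with hf | hf; exact Or.inl ((h f).mp hf); exact Or.inr hf)]
      exact ih s₁ s₂ h
    · rw [myDedup, if_neg hf, myDedup,
        if_neg (by rintro (hf2 | hf2); exact hf (Or.inl ((h f).mpr hf2)); exact hf (Or.inr hf2))]
      refine congrArg (f :: ·) (ih _ _ ?_)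
      intro x; simp only [List.mem_cons]
      exact or_congr Iff.rfl (h x)

theorem loop2_eq_myDedup : ∀ (l acc : List String),
    l.foldl (fun acc f => if f ∉ acc ∧ f ≠ "id" then acc ++ [f] else acc) acc
      = acc ++ myDedup acc l := by
  intro l
  induction l with
  | nil => intro acc; simp [myDedup]
  | cons f l' ih =>
    intro acc
    by_cases h : f ∈ acc ∨ f = "id"
    · rw [List.foldl_cons, if_neg (by tauto), myDedup, if_pos h]
      exact ih acc
    · push_neg at h
      rw [List.foldl_cons, if_pos h, myDedup, if_neg (by tauto), ih]
      rw [myDedup_congr l' (acc ++ [f]) (f :: acc) (by intro x; simp [or_comm])]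
      simp

theorem A_eq_target (fieldnames : List String) (h : fieldnames ≠ []) :
    order_scorecard_fields_py fieldnames = targetT fieldnames := by
  unfold order_scorecard_fields_py
  rw [if_neg h]
  simp only [PySem.List.foldl_append_ite_eq_filter, List.nil_append, loop2_eq_myDedup]
  unfold targetT headD
  by_cases hid : "id" ∈ fieldnames <;> simp [hid]

theorem index?_mem_bound {l : List String} {x : String} (h : x ∈ l) :
    ∃ k, PySem.List.index? l x = some k ∧ k < l.length := by
  obtain ⟨k, hk⟩ := Option.isSome_iff_exists.mp ((PySem.List.index?_isSome_iff l x).mpr h)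
  obtain ⟨hlt, -, -⟩ := PySem.List.getElem_of_index?_eq_some hk
  exact ⟨k, hk, hlt⟩

theorem idx_cons_of_mem_ne {l' : List String} {f a : String} (ha : a ∈ l') (hne : f ≠ a) :
    (PySem.List.index? (f :: l') a).getD 0 = (PySem.List.index? l' a).getD 0 + 1 := by
  rw [PySem.List.index?_cons_of_ne l' hne]
  obtain ⟨k, hk, -⟩ := index?_mem_bound ha
  rw [hk]; rfl

theorem pairwise_idx_myDedup : ∀ (l seen : List String),
    (myDedup seen l).Pairwise
      (fun a b => (PySem.List.index? l a).getD 0 < (PySem.List.index? l b).getD 0) := by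
  intro l
  induction l with
  | nil => intro seen; simp [myDedup]
  | cons f l' ih =>
    intro seen
    by_cases h : f ∈ seen ∨ f = "id"
    · rw [myDedup, if_pos h]
      refine (ih seen).imp_of_mem ?_
      intro a b hma hmb hab
      obtain ⟨hal, has, haid⟩ := (mem_myDedup a l' seen).mp hma
      obtain ⟨hbl, hbs, hbid⟩ := (mem_myDedup b l' seen).mp hmb
      have haf : f ≠ a := by rintro rfl; tauto
      have hbf : f ≠ b := by rintro rfl; tauto
      rw [idx_cons_of_mem_ne hal haf, idx_cons_of_mem_ne hbl hbf]
      omega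
    · rw [myDedup, if_neg h]
      push_neg at h
      refine List.pairwise_cons.mpr ⟨?_, ?_⟩
      · intro b hb
        obtain ⟨hbl, hbs, -⟩ := (mem_myDedup b l' (f :: seen)).mp hb
        have hbf : f ≠ b := fun hfb => hbs (hfb ▸ List.mem_cons_self ..)
        rw [idx_cons_of_mem_ne hbl hbf, PySem.List.index?_cons_self]
        simp
      · refine (ih (f :: seen)).imp_of_mem ?_
        intro a b hma hmb hab
        obtain ⟨hal, has, -⟩ := (mem_myDedup a l' (f :: seen)).mp hma
        obtain ⟨hbl, hbs, -⟩ := (mem_myDedup b l' (f :: seen)).mp hmb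
        have haf : f ≠ a := fun hfa => has (hfa ▸ List.mem_cons_self ..)
        have hbf : f ≠ b := fun hfb => hbs (hfb ▸ List.mem_cons_self ..)
        rw [idx_cons_of_mem_ne hal haf, idx_cons_of_mem_ne hbl hbf]
        omega

theorem rank_lt_four_of_mem {f : String} (h : f ∈ preferredFirst) : rankB f < 4 := by
  fin_cases h <;> decide

theorem rank_eq_four {f : String} (h : f ∉ preferredFirst) (hne : f ≠ "id") : rankB f = 4 := by
  unfold rankB
  rw [(PySem.List.index?_eq_none_iff preferredFirst f).mpr h]
  simp [hne, preferredFirst]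

theorem rank_id : rankB "id" = 5 := by decide

theorem pairwise_rank_pf : preferredFirst.Pairwise (fun a b => rankB a < rankB b) := by decide

theorem keyB_lt_of_rank_lt (fieldnames : List String) {a b : String}
    (ha : a ∈ fieldnames) (hr : rankB a < rankB b) :
    keyB fieldnames a < keyB fieldnames b := by
  obtain ⟨k, hk, hkl⟩ := index?_mem_bound ha
  unfold keyB
  rw [hk]
  calc rankB a * fieldnames.length + (some k).getD 0
      < (rankB a + 1) * fieldnames.length := by simp [Nat.succ_mul]; omega
    _ ≤ rankB b * fieldnames.length := Nat.mul_le_mul_right _ hr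
    _ ≤ _ := Nat.le_add_right _ _

theorem mem_headD_iff (fieldnames : List String) (f : String) :
    f ∈ headD fieldnames ↔ f ∈ preferredFirst ∧ f ∈ fieldnames := by
  simp [headD]

theorem rank_of_mem_mid {fieldnames : List String} {f : String} (hf : f ∈ myDedup (headD fieldnames) fieldnames) :
    rankB f = 4 := by
  obtain ⟨hl, hs, hid⟩ := (mem_myDedup f fieldnames (headD fieldnames)).mp hf
  refine rank_eq_four (fun hp => hs ((mem_headD_iff fieldnames f).mpr ⟨hp, hl⟩)) hid

theorem pairwise_key_target (fieldnames : List String) :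
    (targetT fieldnames).Pairwise (fun a b => keyB fieldnames a < keyB fieldnames b) := by
  unfold targetT
  rw [List.pairwise_append]
  refine ⟨?_, ?_, ?_⟩
  · -- head
    refine (List.Pairwise.filter _ pairwise_rank_pf).imp_of_mem ?_
    intro a b hma hmb hab
    have ha : a ∈ fieldnames := ((mem_headD_iff fieldnames a).mp hma).2
    exact keyB_lt_of_rank_lt fieldnames ha hab
  · rw [List.pairwise_append]
    refine ⟨?_, ?_, ?_⟩
    · -- mid: equal rank 4, increasing first-occurrence index
      refine (pairwise_idx_myDedup fieldnames (headD fieldnames)).imp_of_mem ?_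
      intro a b hma hmb hab
      unfold keyB
      rw [rank_of_mem_mid hma, rank_of_mem_mid hmb]
      omega
    · -- tail
      split <;> simp
    · -- mid vs tail
      intro a hma b hmb
      have hb : b = "id" ∧ "id" ∈ fieldnames := by
        rcases Decidable.em ("id" ∈ fieldnames) with hid | hid <;> simp [hid] at hmb
        exact ⟨hmb, hid⟩
      obtain ⟨rfl, hid⟩ := hb
      have ha : a ∈ fieldnames := ((mem_myDedup a fieldnames _).mp hma).1
      exact keyB_lt_of_rank_lt fieldnames ha (by rw [rank_of_mem_mid hma, rank_id]; omega)
  · -- head vs (mid ++ tail)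
    intro a hma b hmb
    obtain ⟨hap, ha⟩ := (mem_headD_iff fieldnames a).mp hma
    have hra : rankB a < 4 := rank_lt_four_of_mem hap
    rcases List.mem_append.mp hmb with hmb | hmb
    · exact keyB_lt_of_rank_lt fieldnames ha (by rw [rank_of_mem_mid hmb]; omega)
    · have hb : b = "id" := by
        rcases Decidable.em ("id" ∈ fieldnames) with hid | hid <;> simp [hid] at hmb
        exact hmb
      subst hb
      exact keyB_lt_of_rank_lt fieldnames ha (by rw [rank_id]; omega)

theorem mem_target (fieldnames : List String) (x : String) :
    x ∈ targetT fieldnames ↔ x ∈ fieldnames := by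
  unfold targetT
  simp only [List.mem_append, mem_headD_iff, mem_myDedup]
  constructor
  · rintro (⟨-, h⟩ | ⟨h, -, -⟩ | h)
    · exact h
    · exact h
    · rcases Decidable.em ("id" ∈ fieldnames) with hid | hid <;> simp [hid] at h
      exact h ▸ hid
  · intro hx
    by_cases hid : x = "id"
    · subst hid
      exact Or.inr (Or.inr (by simp [hx]))
    · by_cases hh : x ∈ headD fieldnames
      · exact Or.inl ((mem_headD_iff fieldnames x).mp hh)
      · exact Or.inr (Or.inl ⟨hx, fun hm => hh ((mem_headD_iff fieldnames x).mpr hm), hid⟩)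

theorem nodup_target (fieldnames : List String) : (targetT fieldnames).Nodup := by
  unfold targetT
  rw [List.nodup_append]
  refine ⟨List.Nodup.filter _ (by decide), ?_, ?_⟩
  · rw [List.nodup_append]
    refine ⟨nodup_myDedup _ _, ?_, ?_⟩
    · split <;> simp
    · intro a hma b hmb
      have : a ≠ "id" := ((mem_myDedup a fieldnames _).mp hma).2.2
      rcases Decidable.em ("id" ∈ fieldnames) with hid | hid <;> simp [hid] at hmb
      rintro rfl; exact this hmb
  · intro a hma b hmb
    rcases List.mem_append.mp hmb with hmb | hmb
    · rintro rfl
      exact ((mem_myDedup a fieldnames _).mp hmb).2.1 hma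
    · rintro rfl
      have : a = "id" := by
        rcases Decidable.em ("id" ∈ fieldnames) with hid | hid <;> simp [hid] at hmb
        exact hmb
      subst this
      exact (by decide : "id" ∉ preferredFirst) ((mem_headD_iff fieldnames "id").mp hma).1

theorem B_eq_target (fieldnames : List String) (h : fieldnames ≠ []) :
    order_scorecard_fields_py_alt fieldnames = targetT fieldnames := by
  unfold order_scorecard_fields_py_alt
  rw [if_neg h]
  refine PySem.List.sorted_eq_of_perm_of_pairwise_lt _ _ _ ?_ (pairwise_key_target fieldnames)
  rw [List.perm_ext_iff_of_nodup (nodup_target fieldnames) (PySem.List.nodup_dedup fieldnames)]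
  intro a
  rw [mem_target, PySem.List.mem_dedup]

-- ===== VERDICT (by name: the statement is the Claim_ definition above) =====
theorem order_scorecard_fields_py_spec : Claim_equal_order_scorecard_fields_py := by
  intro fieldnames _
  unfold Spec_order_scorecard_fields_py
  by_cases h : fieldnames = []
  · subst h; rfl
  · rw [A_eq_target fieldnames h, B_eq_target fieldnames h]
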